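-- pv_equiv track=rewrite | github.com/tikeysus/Problems_CPS109 | labs109.py | count_growlers
-- ===== SOURCE A (Python) =====
-- def count_growlers(animals):
--     growl_count = 0
--     for i in range(len(animals)):
--         if ((animals[i] == "tac" or animals[i] == "god") and (animals[i + 1:].count("dog") + animals[i + 1:].count("god") > animals[i + 1:].count("cat") + animals[i + 1:].count("tac"))):
--             growl_count += 1
--         if ((animals[i] == "cat" or animals[i] == "dog") and (animals[:i].count("dog") + animals[:i].count("god") > animals[:i].count("cat") + animals[:i].count("tac"))):
--             growl_count += 1
--     return growl_count
-- ===== SOURCE B (Python) =====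
-- def _val(a):
--     if a in ("dog", "god"):
--         return 1
--     if a in ("cat", "tac"):
--         return -1
--     return 0
--
-- def count_growlers(animals):
--     total = sum(_val(a) for a in animals)
--     growls = 0
--     prefix = 0
--     for a in animals:
--         v = _val(a)
--         if a in ("tac", "god"):
--             if total - prefix - v > 0:
--                 growls += 1
--         elif a in ("cat", "dog"):
--             if prefix > 0:
--                 growls += 1
--         prefix += v
--     return growls
-- ===== Notes on version B (the rewrite author's own statement) =====
-- stated objective: alternative
-- what changed: Replaced the per-index slicing with four .count() scans by a single pass maintaining a running prefix sum of (dogs-cats), with the suffix value obtained as total - prefix - current; asymptotically O(n) vs A's O(n^2) on animal-heavy lists, but on random lists A short-circuits and is also linear, so no speed is claimed.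
import Mathlib
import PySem

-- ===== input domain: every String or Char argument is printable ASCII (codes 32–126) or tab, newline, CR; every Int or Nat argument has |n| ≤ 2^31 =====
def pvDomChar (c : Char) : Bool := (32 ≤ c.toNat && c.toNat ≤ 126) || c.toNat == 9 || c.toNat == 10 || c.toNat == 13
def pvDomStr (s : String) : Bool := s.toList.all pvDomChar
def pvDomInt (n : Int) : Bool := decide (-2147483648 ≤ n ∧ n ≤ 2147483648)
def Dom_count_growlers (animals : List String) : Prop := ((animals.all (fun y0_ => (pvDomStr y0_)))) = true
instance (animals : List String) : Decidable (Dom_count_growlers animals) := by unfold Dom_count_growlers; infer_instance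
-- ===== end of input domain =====

-- B replaces A's slice-and-count loop by one pass with a running prefix sum of (dogs-cats) (objective: alternative).

-- ===== PORT A =====
def count_growlers (animals : List String) : Int :=
  (PySem.List.pyRange 0 (animals.length : Int) 1).foldl (fun growl i =>
    let ai := PySem.List.pyGetD animals i ""   -- i ∈ range(len(animals)), always in range
    let suf := PySem.List.slice animals (some (i+1)) none     -- animals[i+1:]
    let pre := PySem.List.slice animals none (some i)          -- animals[:i]
    let growl := if (ai = "tac" ∨ ai = "god") ∧
        (suf.count "dog" + suf.count "god" > suf.count "cat" + suf.count "tac") then growl + 1 else growl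
    if (ai = "cat" ∨ ai = "dog") ∧
        (pre.count "dog" + pre.count "god" > pre.count "cat" + pre.count "tac") then growl + 1 else growl) 0

-- ===== PORT B =====
def pvVal (a : String) : Int :=
  if a = "dog" ∨ a = "god" then 1
  else if a = "cat" ∨ a = "tac" then -1
  else 0

def count_growlers_alt (animals : List String) : Int :=
  let total := (animals.map pvVal).sum
  (animals.foldl (fun st a =>
      let v := pvVal a
      let growls :=
        if a = "tac" ∨ a = "god" then (if total - st.2 - v > 0 then st.1 + 1 else st.1)
        else if a = "cat" ∨ a = "dog" then (if st.2 > 0 then st.1 + 1 else st.1)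
        else st.1
      (growls, st.2 + v)) ((0 : Int), (0 : Int))).1

-- ===== PRECONDITION & SPEC =====
def Spec_count_growlers (animals : List String) (out : Int) : Prop := out = count_growlers_alt animals
instance (animals : List String) (out : Int) : Decidable (Spec_count_growlers animals out) := by unfold Spec_count_growlers; infer_instance

-- ===== CLAIM (what is proved, stated in full; the proofs are below) =====
def Claim_equal_count_growlers : Prop := ∀ (animals : List String), Dom_count_growlers animals → Spec_count_growlers animals (count_growlers animals)

-- ===== LEMMAS AND PROOFS =====

-- reference recursion: contribution of the rest of the list, given the prefix value p and the whole-list value total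
def pvSpec (total p : Int) : List String → Int
  | [] => 0
  | a :: t =>
      (if (a = "tac" ∨ a = "god") ∧ total - p - pvVal a > 0 then 1 else 0)
      + (if (a = "cat" ∨ a = "dog") ∧ p > 0 then 1 else 0)
      + pvSpec total (p + pvVal a) t

theorem pvVal_eq_counts (m : List String) :
    (m.map pvVal).sum = ((m.count "dog" : Int) + m.count "god") - ((m.count "cat" : Int) + m.count "tac") := by
  induction m with
  | nil => simp
  | cons a t ih =>
    simp only [List.map_cons, List.sum_cons, List.count_cons, ih, pvVal]
    by_cases h1 : a = "dog" <;> by_cases h2 : a = "god" <;> by_cases h3 : a = "cat" <;> by_cases h4 : a = "tac" <;>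
      simp_all <;> push_cast <;> ring

theorem counts_pos_iff (m : List String) :
    (m.count "dog" + m.count "god" > m.count "cat" + m.count "tac") ↔ (m.map pvVal).sum > 0 := by
  rw [pvVal_eq_counts]; omega

-- B's fold computes pvSpec
theorem alt_fold (l : List String) (total g p : Int) :
    (l.foldl (fun st a =>
      let v := pvVal a
      let growls :=
        if a = "tac" ∨ a = "god" then (if total - st.2 - v > 0 then st.1 + 1 else st.1)
        else if a = "cat" ∨ a = "dog" then (if st.2 > 0 then st.1 + 1 else st.1)
        else st.1
      (growls, st.2 + v)) (g, p)).1 = g + pvSpec total p l := by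
  induction l generalizing g p with
  | nil => simp [pvSpec]
  | cons a t ih =>
    simp only [List.foldl_cons, ih, pvSpec]
    by_cases h1 : a = "tac" ∨ a = "god"
    · have h2 : ¬ (a = "cat" ∨ a = "dog") := by rcases h1 with h | h <;> subst h <;> simp
      simp only [h1, h2, true_and, false_and, if_false]
      split_ifs <;> ring
    · simp only [h1, false_and, if_false]
      by_cases h2 : a = "cat" ∨ a = "dog" <;> simp only [h2, true_and, false_and, if_false]
      · split_ifs <;> ring
      · ring

-- A's fold, summed over the tail indices, computes pvSpec as well
theorem a_sum (l : List String) (pre : List String) :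
    ((PySem.List.pyRange (pre.length : Int) ((pre.length : Int) + (l.length : Int)) 1).map (fun i =>
      (if ((PySem.List.pyGetD (pre ++ l) i "") = "tac" ∨ (PySem.List.pyGetD (pre ++ l) i "") = "god") ∧
          ((PySem.List.slice (pre ++ l) (some (i+1)) none).count "dog" + (PySem.List.slice (pre ++ l) (some (i+1)) none).count "god" >
           (PySem.List.slice (pre ++ l) (some (i+1)) none).count "cat" + (PySem.List.slice (pre ++ l) (some (i+1)) none).count "tac") then (1:Int) else 0)
      + (if ((PySem.List.pyGetD (pre ++ l) i "") = "cat" ∨ (PySem.List.pyGetD (pre ++ l) i "") = "dog") ∧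
          ((PySem.List.slice (pre ++ l) none (some i)).count "dog" + (PySem.List.slice (pre ++ l) none (some i)).count "god" >
           (PySem.List.slice (pre ++ l) none (some i)).count "cat" + (PySem.List.slice (pre ++ l) none (some i)).count "tac") then (1:Int) else 0))).sum
    = pvSpec ((pre ++ l).map pvVal).sum ((pre.map pvVal).sum) l := by
  induction l generalizing pre with
  | nil =>
    rw [PySem.List.pyRange_one_eq_nil (by simp)]
    simp [pvSpec]
  | cons a t ih =>
    rw [PySem.List.pyRange_one_cons (by push_cast [List.length_cons]; omega)]
    rw [List.map_cons, List.sum_cons]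
    have hget : PySem.List.pyGetD (pre ++ a :: t) (pre.length : Int) "" = a := by
      rw [PySem.List.pyGetD_natCast]
      simp [List.getD]
    have hsuf : PySem.List.slice (pre ++ a :: t) (some ((pre.length : Int) + 1)) none = t := by
      have : ((pre.length : Int) + 1) = ((pre.length + 1 : Nat) : Int) := by push_cast; ring
      rw [this, PySem.List.slice_from_natCast,
        show pre ++ a :: t = (pre ++ [a]) ++ t by simp,
        show pre.length + 1 = (pre ++ [a]).length by simp, List.drop_left]
    have hpre : PySem.List.slice (pre ++ a :: t) none (some (pre.length : Int)) = pre := by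
      rw [PySem.List.slice_to_natCast]
      simp
    have htail : ((pre.length : Int) + 1) = (((pre ++ [a]).length : Nat) : Int) := by
      push_cast [List.length_append, List.length_cons, List.length_nil]; ring
    have hend : ((pre.length : Int) + ((a :: t).length : Int)) = (((pre ++ [a]).length : Int) + (t.length : Int)) := by
      push_cast [List.length_append, List.length_cons, List.length_nil]; ring
    rw [hget, hsuf, hpre, htail, hend]
    have hassoc : pre ++ a :: t = (pre ++ [a]) ++ t := by simp
    simp only [hassoc]
    rw [ih (pre ++ [a])]
    have hv : ((pre ++ [a]).map pvVal).sum = (pre.map pvVal).sum + pvVal a := by simp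
    have htot : (((pre ++ [a]) ++ t).map pvVal).sum - (pre.map pvVal).sum - pvVal a = (t.map pvVal).sum := by
      simp
    simp only [pvSpec, counts_pos_iff, hv]
    rw [htot]

-- ===== VERDICT (by name: the statement is the Claim_ definition above) =====
theorem count_growlers_spec : Claim_equal_count_growlers := by
  intro animals _
  unfold Spec_count_growlers count_growlers count_growlers_alt
  have hbody : (fun (growl : Int) (i : Int) =>
      let ai := PySem.List.pyGetD animals i ""
      let suf := PySem.List.slice animals (some (i+1)) none
      let pre := PySem.List.slice animals none (some i)
      let growl := if (ai = "tac" ∨ ai = "god") ∧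
          (suf.count "dog" + suf.count "god" > suf.count "cat" + suf.count "tac") then growl + 1 else growl
      if (ai = "cat" ∨ ai = "dog") ∧
          (pre.count "dog" + pre.count "god" > pre.count "cat" + pre.count "tac") then growl + 1 else growl)
      = (fun (growl : Int) (i : Int) => growl +
        ((if ((PySem.List.pyGetD animals i "") = "tac" ∨ (PySem.List.pyGetD animals i "") = "god") ∧
          ((PySem.List.slice animals (some (i+1)) none).count "dog" + (PySem.List.slice animals (some (i+1)) none).count "god" >
           (PySem.List.slice animals (some (i+1)) none).count "cat" + (PySem.List.slice animals (some (i+1)) none).count "tac") then (1:Int) else 0)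
        + (if ((PySem.List.pyGetD animals i "") = "cat" ∨ (PySem.List.pyGetD animals i "") = "dog") ∧
          ((PySem.List.slice animals none (some i)).count "dog" + (PySem.List.slice animals none (some i)).count "god" >
           (PySem.List.slice animals none (some i)).count "cat" + (PySem.List.slice animals none (some i)).count "tac") then (1:Int) else 0))) := by
    funext growl i
    simp only []
    split_ifs <;> ring
  rw [hbody, PySem.List.foldl_add]
  have hs := a_sum animals []
  simp only [List.nil_append, List.length_nil, Nat.cast_zero, zero_add] at hs
  rw [alt_fold]
  simp only [zero_add]
  exact hs
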